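-- pv_equiv track=rewrite | github.com/dqzg12300/kAlgorithmTools | common/Util.py | ByteToHexStr
-- ===== SOURCE A (Python) =====
-- def ByteToHexStr(mystr):
--     decodeData = ""
--     sublist=mystr.split(' ')
--     if len(sublist)>1:
--         for idx,buf in enumerate(sublist):
--             decodeData+=buf+" "
--             if (idx + 1) % 16 == 0:
--                 decodeData += "\n"
--         return decodeData
--     for idx, buf in enumerate(mystr):
--         decodeData += buf
--         if (idx + 1) % 2 == 0:
--             decodeData += " "
--         if (idx + 1) % 32 == 0:
--             decodeData += "\n"
--     return decodeData
-- ===== SOURCE B (Python) =====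
-- def ByteToHexStr(mystr):
--     sublist = mystr.split(' ')
--     if len(sublist) > 1:
--         parts = []
--         for i in range(0, len(sublist), 16):
--             group = sublist[i:i + 16]
--             parts.append(''.join(tok + ' ' for tok in group))
--             if len(group) == 16:
--                 parts.append('\n')
--         return ''.join(parts)
--     parts = []
--     for i in range(0, len(mystr), 2):
--         pair = mystr[i:i + 2]
--         parts.append(pair + (' ' if len(pair) == 2 else ''))
--         if len(pair) == 2 and (i + 2) % 32 == 0:
--             parts.append('\n')
--     return ''.join(parts)
-- ===== Notes on version B (the rewrite author's own statement) =====
-- stated objective: alternative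
-- what changed: Replaces A's single per-element pass with modulo counters and string concatenation by slicing: the token branch groups the split list into 16-token chunks joined per line, the char branch walks the string in steps of 2 emitting complete pairs, and the result is assembled by joining a parts list instead of repeated concatenation.
import Mathlib
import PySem

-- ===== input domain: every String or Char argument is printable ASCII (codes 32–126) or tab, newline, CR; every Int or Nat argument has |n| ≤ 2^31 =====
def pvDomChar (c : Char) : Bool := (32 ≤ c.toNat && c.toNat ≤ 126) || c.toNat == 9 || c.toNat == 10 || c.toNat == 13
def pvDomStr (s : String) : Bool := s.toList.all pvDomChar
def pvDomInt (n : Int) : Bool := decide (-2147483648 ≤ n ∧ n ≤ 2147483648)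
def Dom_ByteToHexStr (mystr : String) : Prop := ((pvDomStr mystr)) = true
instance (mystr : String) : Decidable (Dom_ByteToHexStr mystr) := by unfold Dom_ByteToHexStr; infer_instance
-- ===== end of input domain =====

-- B reassembles the output by chunking/slicing (16-token groups, character pairs) instead of
-- A's per-element modulo counters; same result, a different decomposition (objective: alternative).
-- Ports work over List Char (PySem.Chars) and wrap with String.ofList, which is exact for these ops.

-- ===== PORT A =====
-- literal transliteration of A: split on ' '; token branch folds over enumerate(sublist)
-- appending tok+" " and "\n" every 16th; char branch folds over enumerate(mystr) appending
-- the char, " " every 2nd, "\n" every 32nd.  Int % with positive divisor matches Python %.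
def ByteToHexStr (mystr : String) : String :=
  let sublist := PySem.Chars.splitOn mystr.toList [' ']
  if sublist.length > 1 then
    String.ofList ((PySem.List.enumerate sublist).foldl
      (fun acc p => acc ++ p.2 ++ [' '] ++ (if (p.1 + 1) % 16 = 0 then ['\n'] else [])) [])
  else
    String.ofList ((PySem.List.enumerate mystr.toList).foldl
      (fun acc p => acc ++ [p.2] ++ (if (p.1 + 1) % 2 = 0 then [' '] else [])
                        ++ (if (p.1 + 1) % 32 = 0 then ['\n'] else [])) [])

-- ===== PORT B =====
-- Source B token branch: consume the split list in slices of 16 tokens, one joined line per slice,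
-- a newline after each complete slice.
def pvChunkTok (l : List (List Char)) : List Char :=
  if hne : l = [] then []
  else
    ((l.take 16).map (· ++ [' '])).flatten
      ++ (if (l.take 16).length = 16 then ['\n'] else [])
      ++ pvChunkTok (l.drop 16)
termination_by l.length
decreasing_by
  simp only [List.length_drop]
  have : 0 < l.length := List.length_pos_iff.mpr hne
  omega

-- Source B char branch: walk in steps of 2; a complete pair gets a trailing space and, at a
-- 32-character boundary, a newline; a lone final char is emitted bare.
def pvPairs (i : Int) : List Char → List Char
  | [] => []
  | [c] => [c]
  | c1 :: c2 :: rest =>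
      ([c1, c2] ++ [' ']) ++ (if (i + 2) % 32 = 0 then ['\n'] else []) ++ pvPairs (i + 2) rest

def ByteToHexStr_alt (mystr : String) : String :=
  let sublist := PySem.Chars.splitOn mystr.toList [' ']
  if sublist.length > 1 then String.ofList (pvChunkTok sublist)
  else String.ofList (pvPairs 0 mystr.toList)

-- ===== PRECONDITION & SPEC =====
def Spec_ByteToHexStr (mystr : String) (out : String) : Prop := out = ByteToHexStr_alt mystr
instance (mystr : String) (out : String) : Decidable (Spec_ByteToHexStr mystr out) := by unfold Spec_ByteToHexStr; infer_instance

-- ===== CLAIM (what is proved, stated in full; the proofs are below) =====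
def Claim_equal_ByteToHexStr : Prop := ∀ (mystr : String), Dom_ByteToHexStr mystr → Spec_ByteToHexStr mystr (ByteToHexStr mystr)

-- ===== LEMMAS AND PROOFS =====

-- A's token loop, foldl peeled into a structural recursion carrying the enumerate index
def pvATok (i : Int) : List (List Char) → List Char
  | [] => []
  | b :: rest => b ++ [' '] ++ (if (i + 1) % 16 = 0 then ['\n'] else []) ++ pvATok (i + 1) rest

-- A's char loop, likewise
def pvAChr (i : Int) : List Char → List Char
  | [] => []
  | c :: rest =>
      [c] ++ (if (i + 1) % 2 = 0 then [' '] else [])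
          ++ (if (i + 1) % 32 = 0 then ['\n'] else []) ++ pvAChr (i + 1) rest

lemma foldl_pvATok (l : List (List Char)) : ∀ (i : Int) (acc : List Char),
    (PySem.List.enumerate l i).foldl
      (fun acc p => acc ++ p.2 ++ [' '] ++ (if (p.1 + 1) % 16 = 0 then ['\n'] else [])) acc
      = acc ++ pvATok i l := by
  induction l with
  | nil => intro i acc; simp [PySem.List.enumerate_nil, pvATok]
  | cons b rest ih =>
      intro i acc
      rw [PySem.List.enumerate_cons, List.foldl_cons, ih]
      simp [pvATok, List.append_assoc]

lemma foldl_pvAChr (l : List Char) : ∀ (i : Int) (acc : List Char),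
    (PySem.List.enumerate l i).foldl
      (fun acc p => acc ++ [p.2] ++ (if (p.1 + 1) % 2 = 0 then [' '] else [])
                        ++ (if (p.1 + 1) % 32 = 0 then ['\n'] else [])) acc
      = acc ++ pvAChr i l := by
  induction l with
  | nil => intro i acc; simp [PySem.List.enumerate_nil, pvAChr]
  | cons c rest ih =>
      intro i acc
      rw [PySem.List.enumerate_cons, List.foldl_cons, ih]
      simp [pvAChr, List.append_assoc]

-- stepping A's token loop through one k-token slice (k tokens left until the next newline)
lemma pvATok_slice (l : List (List Char)) : ∀ (k : Nat) (i : Int), 0 < k → k ≤ 16 →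
    i % 16 = 16 - (k : Int) →
    pvATok i l = ((l.take k).map (· ++ [' '])).flatten
      ++ (if k ≤ l.length then ['\n'] ++ pvATok (i + k) (l.drop k) else []) := by
  induction l with
  | nil =>
      intro k i hk hk16 hi
      simp only [List.take_nil, List.map_nil, List.flatten_nil, List.length_nil,
        List.nil_append, pvATok]
      rw [if_neg (by omega)]
  | cons b rest ih =>
      intro k i hk hk16 hi
      by_cases h1 : k = 1
      · subst h1
        have hcond : (i + 1) % 16 = 0 := by omega
        simp [pvATok, hcond, List.append_assoc]
      · have hcond : ¬ (i + 1) % 16 = 0 := by omega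
        have hrec := ih (k - 1) (i + 1) (by omega) (by omega) (by push_cast [Nat.cast_sub (by omega : 1 ≤ k)]; omega)
        have hidx : i + 1 + ((k - 1 : Nat) : Int) = i + (k : Int) := by
          push_cast [Nat.cast_sub (by omega : 1 ≤ k)]; ring
        rw [hidx] at hrec
        have htake : (b :: rest).take k = b :: rest.take (k - 1) := by
          cases k with
          | zero => omega
          | succ m => simp
        have hdrop : (b :: rest).drop k = rest.drop (k - 1) := by
          cases k with
          | zero => omega
          | succ m => simp
        have hlen : (k ≤ (b :: rest).length) = (k - 1 ≤ rest.length) := by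
          simp only [List.length_cons, eq_iff_iff]; omega
        simp only [pvATok, if_neg hcond, hrec, htake, hdrop, hlen, List.map_cons,
          List.flatten_cons, List.append_assoc, List.nil_append]

lemma pvATok_eq_chunk : ∀ (n : Nat) (l : List (List Char)) (i : Int), l.length ≤ n →
    0 ≤ i → i % 16 = 0 → pvATok i l = pvChunkTok l := by
  intro n
  induction n with
  | zero =>
      intro l i hl _ _
      have : l = [] := List.length_eq_zero_iff.mp (Nat.le_zero.mp hl)
      subst this; simp [pvATok, pvChunkTok]
  | succ m ih =>
      intro l i hl hi0 hi
      by_cases h : l = []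
      · subst h; simp [pvATok, pvChunkTok]
      · rw [pvChunkTok]; simp only [h, dif_neg, not_false_iff]
        have hs := pvATok_slice l 16 i (by norm_num) (le_refl _) (by push_cast; omega)
        rw [hs]
        by_cases hlen : 16 ≤ l.length
        · have h16 : (l.take 16).length = 16 := by simp [List.length_take]; omega
          rw [if_pos hlen, if_pos h16]
          have hrec := ih (l.drop 16) (i + (16 : Nat)) (by simp [List.length_drop]; omega)
            (by push_cast; omega) (by push_cast; omega)
          rw [hrec]
          simp [List.append_assoc]
        · have h16 : ¬ (l.take 16).length = 16 := by simp [List.length_take]; omega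
          have hdrop : l.drop 16 = [] := by
            apply List.eq_nil_of_length_eq_zero; simp [List.length_drop]; omega
          rw [if_neg hlen, if_neg h16, hdrop, pvChunkTok]
          simp

lemma pvAChr_eq_pairs : ∀ (n : Nat) (l : List Char) (i : Int), l.length ≤ n →
    i % 2 = 0 → pvAChr i l = pvPairs i l := by
  intro n
  induction n with
  | zero =>
      intro l i hl _
      have : l = [] := List.length_eq_zero_iff.mp (Nat.le_zero.mp hl)
      subst this; simp [pvAChr, pvPairs]
  | succ m ih =>
      intro l i hl hi
      match l with
      | [] => simp [pvAChr, pvPairs]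
      | [c] =>
          have h2 : ¬ (i + 1) % 2 = 0 := by omega
          have h32 : ¬ (i + 1) % 32 = 0 := by omega
          simp [pvAChr, pvPairs, h2, h32]
      | c1 :: c2 :: rest =>
          have h2a : ¬ (i + 1) % 2 = 0 := by omega
          have h32a : ¬ (i + 1) % 32 = 0 := by omega
          have h2b : (i + 1 + 1) % 2 = 0 := by omega
          have hrec := ih rest (i + 2) (by simp at hl ⊢; omega) (by omega)
          simp only [pvAChr, pvPairs, if_neg h2a, if_neg h32a, if_pos h2b,
            List.append_assoc, List.nil_append]
          rw [show i + 1 + 1 = i + 2 by ring, hrec]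
          simp

-- ===== VERDICT (by name: the statement is the Claim_ definition above) =====
theorem ByteToHexStr_spec : Claim_equal_ByteToHexStr := by
  intro mystr _
  unfold Spec_ByteToHexStr ByteToHexStr ByteToHexStr_alt
  simp only
  by_cases h : (PySem.Chars.splitOn mystr.toList [' ']).length > 1
  · rw [if_pos h, if_pos h, foldl_pvATok,
      pvATok_eq_chunk (PySem.Chars.splitOn mystr.toList [' ']).length _ 0 (le_refl _)
        (by norm_num) (by norm_num)]
    rfl
  · rw [if_neg h, if_neg h, foldl_pvAChr,
      pvAChr_eq_pairs mystr.toList.length _ 0 (le_refl _) (by norm_num)]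
    rfl
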